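-- pv_equiv track=rewrite | github.com/CelloTopG/Assistant-CRM | assistant_crm/services/security_service.py | _filter_document_fields
-- ===== SOURCE A (Python) =====
-- def _filter_document_fields(doc, doctype, sensitive_fields):
-- 	"""Filter sensitive fields from a single document"""
-- 	if not isinstance(doc, dict) or not doctype:
-- 		return doc
--
-- 	filtered_doc = doc.copy()
--
-- 	# Remove sensitive fields for this doctype
-- 	if doctype in sensitive_fields:
-- 		for field in sensitive_fields[doctype]:
-- 			if field in filtered_doc:
-- 				filtered_doc[field] = "[FILTERED]"
--
-- 	# Always filter these fields regardless of doctype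
-- 	always_filter = ["password", "api_key", "api_secret", "access_token"]
-- 	for field in always_filter:
-- 		if field in filtered_doc:
-- 			filtered_doc[field] = "[FILTERED]"
--
-- 	return filtered_doc
-- ===== SOURCE B (Python) =====
-- def _filter_document_fields(doc, doctype, sensitive_fields):
-- 	"""Filter sensitive fields from a single document"""
-- 	if not isinstance(doc, dict) or not doctype:
-- 		return doc
--
-- 	filter_set = set(sensitive_fields.get(doctype, []))
-- 	filter_set.update(["password", "api_key", "api_secret", "access_token"])
-- 	return {k: ("[FILTERED]" if k in filter_set else v) for k, v in doc.items()}
-- ===== Notes on version B (the rewrite author's own statement) =====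
-- stated objective: idiomatic
-- what changed: Instead of two field-driven loops that mutate a copied dict, B builds one membership set (doctype-specific fields plus the always-filter names) and constructs the result in a single document-driven dict comprehension.
import Mathlib
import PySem

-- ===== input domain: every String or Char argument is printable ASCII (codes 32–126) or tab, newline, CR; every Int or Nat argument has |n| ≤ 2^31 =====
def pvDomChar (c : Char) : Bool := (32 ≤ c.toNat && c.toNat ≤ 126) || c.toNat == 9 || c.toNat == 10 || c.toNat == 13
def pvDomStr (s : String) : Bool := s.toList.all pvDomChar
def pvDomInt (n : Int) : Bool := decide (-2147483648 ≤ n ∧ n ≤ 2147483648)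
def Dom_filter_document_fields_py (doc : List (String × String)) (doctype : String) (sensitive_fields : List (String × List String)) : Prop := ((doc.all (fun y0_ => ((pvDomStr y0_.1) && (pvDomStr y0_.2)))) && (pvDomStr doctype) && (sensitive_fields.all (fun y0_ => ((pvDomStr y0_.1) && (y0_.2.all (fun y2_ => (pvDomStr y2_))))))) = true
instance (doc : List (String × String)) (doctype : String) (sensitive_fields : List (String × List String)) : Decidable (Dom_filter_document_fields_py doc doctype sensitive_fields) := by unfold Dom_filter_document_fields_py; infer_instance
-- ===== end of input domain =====

-- B replaces A's two field-driven mutation loops over a copied dict with one prebuilt membership set and a single document-driven pass (idiomatic; return value only — neither version mutates its arguments).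


-- ===== PORT A =====
def pvMaskStep (d : PySem.Dict String String) (field : String) : PySem.Dict String String :=
  if d.contains field then d.insert field "[FILTERED]" else d

-- A: copy the document dict, mutate the doctype-specific fields, then the always-filter list.
def filter_document_fields_py (doc : List (String × String)) (doctype : String) (sensitive_fields : List (String × List String)) : List (String × String) :=
  if doctype = "" then doc
  else
    let sens : PySem.Dict String (List String) := PySem.Dict.mk sensitive_fields
    let filtered_doc : PySem.Dict String String := PySem.Dict.mk doc
    let filtered_doc :=
      if sens.contains doctype then
        (sens.getD doctype []).foldl pvMaskStep filtered_doc
      else filtered_doc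
    let always_filter : List String := ["password", "api_key", "api_secret", "access_token"]
    let filtered_doc := always_filter.foldl pvMaskStep filtered_doc
    filtered_doc.items

-- ===== PORT B =====
-- B: one prebuilt membership set, one pass over the document's items.
def filter_document_fields_py_alt (doc : List (String × String)) (doctype : String) (sensitive_fields : List (String × List String)) : List (String × String) :=
  if doctype = "" then doc
  else
    let filter_set : PySem.Set String :=
      PySem.Set.update (PySem.Set.ofList ((PySem.Dict.mk sensitive_fields).getD doctype []))
        ["password", "api_key", "api_secret", "access_token"]
    doc.map (fun p => if p.1 ∈ filter_set then (p.1, "[FILTERED]") else p)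

-- ===== PRECONDITION & SPEC =====
def Spec_filter_document_fields_py (doc : List (String × String)) (doctype : String) (sensitive_fields : List (String × List String)) (out : List (String × String)) : Prop := out = filter_document_fields_py_alt doc doctype sensitive_fields
instance (doc : List (String × String)) (doctype : String) (sensitive_fields : List (String × List String)) (out : List (String × String)) : Decidable (Spec_filter_document_fields_py doc doctype sensitive_fields out) := by unfold Spec_filter_document_fields_py; infer_instance

-- ===== CLAIM (what is proved, stated in full; the proofs are below) =====
def Claim_equal_filter_document_fields_py : Prop := ∀ (doc : List (String × String)) (doctype : String) (sensitive_fields : List (String × List String)), Dom_filter_document_fields_py doc doctype sensitive_fields → Spec_filter_document_fields_py doc doctype sensitive_fields (filter_document_fields_py doc doctype sensitive_fields)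

-- ===== LEMMAS AND PROOFS =====

theorem pvMaskStep_items (d : PySem.Dict String String) (f : String) :
    (pvMaskStep d f).items = d.items.map (fun p => if p.1 = f then (f, "[FILTERED]") else p) := by
  unfold pvMaskStep
  by_cases h : d.contains f = true
  · rw [if_pos h, PySem.Dict.items_insert_of_contains d "[FILTERED]" h]
    simp
  · have hnot : f ∉ d.keys := fun hm => h ((PySem.Dict.contains_iff_mem_keys d f).mpr hm)
    rw [if_neg h]
    nth_rewrite 1 [← List.map_id d.items]
    apply List.map_congr_left
    intro p hp
    have hpk : p.1 ∈ d.keys := List.mem_map_of_mem hp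
    rw [if_neg (fun (hpf : p.1 = f) => hnot (hpf ▸ hpk))]
    rfl

theorem pvMaskFold_items (L : List String) (d : PySem.Dict String String) :
    (L.foldl pvMaskStep d).items = d.items.map (fun p => if p.1 ∈ L then (p.1, "[FILTERED]") else p) := by
  induction L generalizing d with
  | nil => simp
  | cons f L ih =>
    simp only [List.foldl_cons, ih, pvMaskStep_items, List.map_map]
    apply List.map_congr_left
    intro p _
    by_cases hpf : p.1 = f
    · subst hpf; simp
    · simp [Function.comp, hpf]


-- ===== VERDICT (by name: the statement is the Claim_ definition above) =====
theorem filter_document_fields_py_spec : Claim_equal_filter_document_fields_py := by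
  intro doc doctype sensitive_fields _
  unfold Spec_filter_document_fields_py filter_document_fields_py filter_document_fields_py_alt
  by_cases hdt : doctype = ""
  · simp [hdt]
  · simp only [if_neg hdt]
    set sens := PySem.Dict.mk sensitive_fields with hsens
    set Ls : List String := sens.getD doctype [] with hLs
    set Al : List String := ["password", "api_key", "api_secret", "access_token"] with hAl
    by_cases hc : sens.contains doctype = true
    · simp only [hc, if_true, pvMaskFold_items, List.map_map]
      apply List.map_congr_left
      intro p _
      by_cases h1 : p.1 ∈ Ls <;> by_cases h2 : p.1 ∈ Al <;>
        simp [Function.comp, h1, h2, PySem.Set.mem_update, PySem.Set.mem_ofList]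
    · have hLsnil : Ls = [] := by
        rw [hLs, PySem.Dict.getD_of_not_contains]
        simpa using hc
      simp only [hc, pvMaskFold_items, hLsnil]
      apply List.map_congr_left
      intro p _
      by_cases h2 : p.1 ∈ Al <;>
        simp [h2, PySem.Set.mem_update]
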